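-- pv_equiv track=rewrite | github.com/SmokyTail/OldProjects | Other labs/ОП/Lab08/Graphs_1.py | top_weight
-- ===== SOURCE A (Python) =====
-- def top_weight(graph,v):
--     storage=0
--     for i in range(len(graph[v])):
--         if graph[v][i]==1:
--             for j in range(1,v):
--                 if graph[j][i]==1:
--                     storage+=1
--             for j in range(v+1,len(graph)):
--                 if graph[j][i] == 1:
--                     storage += 1
--         elif graph[v][i]==-1:
--             for j in range(1,v):
--                 if graph[j][i]==1:
--                     storage+=1
--             for j in range(v+1,len(graph)):
--                 if graph[j][i] == 1:
--                     storage += 1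
--     return storage
-- ===== SOURCE B (Python) =====
-- def top_weight(graph, v):
--     # Build a per-column table of 1-counts over the scanned rows once,
--     # then read it off along row v's incident columns (single pass each).
--     row = graph[v]
--     ones = {}
--     for j in list(range(1, v)) + list(range(v + 1, len(graph))):
--         for i, x in enumerate(graph[j]):
--             if x == 1:
--                 ones[i] = ones.get(i, 0) + 1
--     return sum(ones.get(i, 0) for i, x in enumerate(row) if x == 1 or x == -1)
-- ===== Notes on version B (the rewrite author's own statement) =====
-- stated objective: alternative
-- what changed: A rescans every row once per incident column of row v; B makes one pass over the scanned rows building a column->count-of-ones dictionary and then reads it off along row v in a single pass.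
import Mathlib
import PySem

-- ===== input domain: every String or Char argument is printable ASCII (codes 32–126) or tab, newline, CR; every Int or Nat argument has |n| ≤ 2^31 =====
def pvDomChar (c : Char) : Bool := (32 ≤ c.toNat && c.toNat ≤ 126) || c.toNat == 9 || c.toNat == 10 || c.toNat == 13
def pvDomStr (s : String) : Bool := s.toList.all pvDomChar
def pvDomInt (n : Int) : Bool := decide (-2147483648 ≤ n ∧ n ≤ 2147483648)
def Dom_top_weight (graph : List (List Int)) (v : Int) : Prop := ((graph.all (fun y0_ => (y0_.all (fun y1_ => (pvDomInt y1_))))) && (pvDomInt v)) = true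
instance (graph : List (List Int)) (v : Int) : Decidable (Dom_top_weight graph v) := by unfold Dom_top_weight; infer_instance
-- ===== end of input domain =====

-- B replaces A's per-incident-column rescan of all rows by one pass over the scanned rows
-- building a column → count-of-ones table, then reads it off along row v (objective: alternative).

-- ===== PORT A =====
def top_weight (graph : List (List Int)) (v : Int) : Int :=
  (PySem.List.pyRange 0 (PySem.List.len (PySem.List.pyGetD graph v [])) 1).foldl
    (fun storage i =>
      if PySem.List.pyGetD (PySem.List.pyGetD graph v []) i 0 = 1 then
        (PySem.List.pyRange (v + 1) (PySem.List.len graph) 1).foldl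
          (fun s j => if PySem.List.pyGetD (PySem.List.pyGetD graph j []) i 0 = 1 then s + 1 else s)
          ((PySem.List.pyRange 1 v 1).foldl
            (fun s j => if PySem.List.pyGetD (PySem.List.pyGetD graph j []) i 0 = 1 then s + 1 else s)
            storage)
      else if PySem.List.pyGetD (PySem.List.pyGetD graph v []) i 0 = -1 then
        (PySem.List.pyRange (v + 1) (PySem.List.len graph) 1).foldl
          (fun s j => if PySem.List.pyGetD (PySem.List.pyGetD graph j []) i 0 = 1 then s + 1 else s)
          ((PySem.List.pyRange 1 v 1).foldl
            (fun s j => if PySem.List.pyGetD (PySem.List.pyGetD graph j []) i 0 = 1 then s + 1 else s)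
            storage)
      else storage)
    0

-- ===== PORT B =====
def top_weight_alt (graph : List (List Int)) (v : Int) : Int :=
  ((PySem.List.enumerate (PySem.List.pyGetD graph v []) 0).map
    (fun p => if p.2 = 1 ∨ p.2 = -1 then
      (((PySem.List.pyRange 1 v 1 ++ PySem.List.pyRange (v + 1) (PySem.List.len graph) 1).foldl
        (fun d j =>
          (PySem.List.enumerate (PySem.List.pyGetD graph j []) 0).foldl
            (fun d q => if q.2 = 1 then d.modify q.1 0 (· + 1) else d) d)
        (PySem.Dict.mk [])).getD p.1 0)
    else 0)).sum

-- ===== PRECONDITION & SPEC =====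
-- Pre_ excludes exactly the inputs on which the Python A raises: v not a valid (Python,
-- possibly negative) row index (IndexError on graph[v]), or some column incident to row v
-- missing from one of the scanned rows of a ragged matrix (IndexError on graph[j][i]).
def Pre_top_weight (graph : List (List Int)) (v : Int) : Prop :=
  PySem.Raise.InRange graph.length v ∧
  ∀ i ∈ PySem.List.pyRange 0 (PySem.List.len (PySem.List.pyGetD graph v [])) 1,
    (PySem.List.pyGetD (PySem.List.pyGetD graph v []) i 0 = 1 ∨
     PySem.List.pyGetD (PySem.List.pyGetD graph v []) i 0 = -1) →
    ∀ j ∈ PySem.List.pyRange 1 v 1 ++ PySem.List.pyRange (v + 1) (PySem.List.len graph) 1,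
      PySem.Raise.InRange (PySem.List.pyGetD graph j []).length i
instance (graph : List (List Int)) (v : Int) : Decidable (Pre_top_weight graph v) := by
  unfold Pre_top_weight; infer_instance

def pvWitness_top_weight : List (List Int) × Int := ([[1, -1], [1, 1], [0, 1]], 0)

def Spec_top_weight (graph : List (List Int)) (v : Int) (out : Int) : Prop := out = top_weight_alt graph v
instance (graph : List (List Int)) (v : Int) (out : Int) : Decidable (Spec_top_weight graph v out) := by unfold Spec_top_weight; infer_instance

-- ===== CLAIM (what is proved, stated in full; the proofs are below) =====
def Claim_equal_top_weight : Prop := ∀ (graph : List (List Int)) (v : Int), Dom_top_weight graph v → Pre_top_weight graph v → Spec_top_weight graph v (top_weight graph v)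

-- ===== LEMMAS AND PROOFS =====

-- the rows both programs scan (all raw Python row indices except 0 and v)
def pvRows (graph : List (List Int)) (v : Int) : List Int :=
  PySem.List.pyRange 1 v 1 ++ PySem.List.pyRange (v + 1) (PySem.List.len graph) 1

-- the common normal form of both programs: over each column of row v that holds ±1,
-- the number of scanned rows holding 1 in that column
def pvNF (graph : List (List Int)) (v : Int) : Int :=
  ((PySem.List.pyRange 0 (PySem.List.len (PySem.List.pyGetD graph v [])) 1).map (fun i =>
    if PySem.List.pyGetD (PySem.List.pyGetD graph v []) i 0 = 1 ∨
       PySem.List.pyGetD (PySem.List.pyGetD graph v []) i 0 = -1 then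
      ((pvRows graph v).map (fun j =>
        if PySem.List.pyGetD (PySem.List.pyGetD graph j []) i 0 = 1 then (1 : Int) else 0)).sum
    else 0)).sum

-- counting fold with a decidable-Prop test, bridged to the Bool library lemmas
lemma pvFoldIf {α : Type} (P : α → Prop) [DecidablePred P] (l : List α) (a : Int) :
    l.foldl (fun s j => if P j then s + 1 else s) a
      = a + (l.map (fun j => if P j then (1 : Int) else 0)).sum := by
  have h := PySem.List.foldl_count_if (fun j => decide (P j)) l a
  simp only [decide_eq_true_eq] at h
  rw [h, ← PySem.List.sum_map_ite_one_zero (fun j => decide (P j))]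
  simp

lemma pvA_eq_NF (graph : List (List Int)) (v : Int) : top_weight graph v = pvNF graph v := by
  unfold top_weight pvNF
  have hb : (fun (storage : Int) (i : Int) =>
      if PySem.List.pyGetD (PySem.List.pyGetD graph v []) i 0 = 1 then
        (PySem.List.pyRange (v + 1) (PySem.List.len graph) 1).foldl
          (fun s j => if PySem.List.pyGetD (PySem.List.pyGetD graph j []) i 0 = 1 then s + 1 else s)
          ((PySem.List.pyRange 1 v 1).foldl
            (fun s j => if PySem.List.pyGetD (PySem.List.pyGetD graph j []) i 0 = 1 then s + 1 else s)
            storage)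
      else if PySem.List.pyGetD (PySem.List.pyGetD graph v []) i 0 = -1 then
        (PySem.List.pyRange (v + 1) (PySem.List.len graph) 1).foldl
          (fun s j => if PySem.List.pyGetD (PySem.List.pyGetD graph j []) i 0 = 1 then s + 1 else s)
          ((PySem.List.pyRange 1 v 1).foldl
            (fun s j => if PySem.List.pyGetD (PySem.List.pyGetD graph j []) i 0 = 1 then s + 1 else s)
            storage)
      else storage)
      = (fun storage i => storage +
          (if PySem.List.pyGetD (PySem.List.pyGetD graph v []) i 0 = 1 ∨
              PySem.List.pyGetD (PySem.List.pyGetD graph v []) i 0 = -1 then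
            ((pvRows graph v).map (fun j =>
              if PySem.List.pyGetD (PySem.List.pyGetD graph j []) i 0 = 1 then (1 : Int) else 0)).sum
          else 0)) := by
    funext storage i
    rw [pvFoldIf, pvFoldIf]
    unfold pvRows
    split_ifs with h1 h2 h3 <;> simp_all <;> ring
  rw [hb, PySem.List.foldl_add]
  simp

-- count of elements equal to i that also satisfy c, over any list
lemma pvCountP (c : Int → Bool) (i : Int) (l : List Int) :
    l.countP (fun j => (j == i) && c j) = if c i then l.count i else 0 := by
  induction l with
  | nil => simp
  | cons x xs ih =>
    simp only [List.countP_cons, List.count_cons, ih]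
    by_cases hx : x = i <;> by_cases hc : c i <;> simp [hx, hc]

-- one row's pass over the counter dict: column i gains 1 exactly when the row holds 1 there
lemma pvInner (xs : List Int) (d : PySem.Dict Int Int) (i : Int) (hi : 0 ≤ i) :
    ((PySem.List.enumerate xs 0).foldl
        (fun d q => if q.2 = 1 then d.modify q.1 0 (· + 1) else d) d).getD i 0
      = d.getD i 0 + (if PySem.List.pyGetD xs i 0 = 1 then (1 : Int) else 0) := by
  have h1 : (PySem.List.enumerate xs 0).foldl
        (fun d q => if q.2 = 1 then d.modify q.1 0 (· + 1) else d) d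
      = (((PySem.List.enumerate xs 0).filter (fun q => q.2 == 1)).map Prod.fst).foldl
          (fun d k => d.modify k 0 (· + 1)) d := by
    rw [List.foldl_map, List.foldl_filter]
    simp only [beq_iff_eq]
  rw [h1, PySem.Dict.getD_foldl_modify_add_one, List.count_eq_countP, List.countP_map,
      List.countP_filter]
  have h2 : (PySem.List.enumerate xs 0) =
      (PySem.List.pyRange 0 (PySem.List.len xs) 1).map (fun j => (j, PySem.List.pyGetD xs j 0)) :=
    PySem.List.enumerate_eq_map_pyRange xs 0
  rw [h2, List.countP_map]
  have h3 : ((PySem.List.pyRange 0 (PySem.List.len xs) 1).countP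
      (fun j => (j == i) && (PySem.List.pyGetD xs j 0 == 1)))
      = if (PySem.List.pyGetD xs i 0 == 1) then (PySem.List.pyRange 0 (PySem.List.len xs) 1).count i else 0 := by
    have := pvCountP (fun j => PySem.List.pyGetD xs j 0 == 1) i (PySem.List.pyRange 0 (PySem.List.len xs) 1)
    simpa using this
  simp only [Function.comp_def]
  rw [h3]
  by_cases hlt : i < xs.length
  · have hmem : i ∈ PySem.List.pyRange 0 (PySem.List.len xs) 1 := by
      rw [PySem.List.mem_pyRange_one]
      constructor
      · exact hi
      · simp [PySem.List.len]; omega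
    rw [List.count_eq_one_of_mem (PySem.List.nodup_pyRange_one _ _) hmem]
    by_cases hv : PySem.List.pyGetD xs i 0 = 1 <;> simp [hv]
  · have hnone : PySem.List.pyGet? xs i = none := by
      rw [PySem.List.pyGet?_eq_none_iff]
      intro hIn
      unfold PySem.Raise.InRange at hIn
      omega
    rw [PySem.List.pyGetD_of_none xs i 0 hnone]
    simp

-- the whole counter dict: column i holds the number of scanned rows with 1 in column i
lemma pvOuter (graph : List (List Int)) (rows : List Int) (d : PySem.Dict Int Int) (i : Int) (hi : 0 ≤ i) :
    ((rows.foldl (fun d j =>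
        (PySem.List.enumerate (PySem.List.pyGetD graph j []) 0).foldl
          (fun d q => if q.2 = 1 then d.modify q.1 0 (· + 1) else d) d) d).getD i 0)
      = d.getD i 0 + (rows.map (fun j =>
          if PySem.List.pyGetD (PySem.List.pyGetD graph j []) i 0 = 1 then (1 : Int) else 0)).sum := by
  induction rows generalizing d with
  | nil => simp
  | cons x xs ih =>
    simp only [List.foldl_cons, List.map_cons, List.sum_cons]
    rw [ih, pvInner _ _ _ hi]
    ring

lemma pvB_eq_NF (graph : List (List Int)) (v : Int) : top_weight_alt graph v = pvNF graph v := by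
  unfold top_weight_alt pvNF pvRows
  rw [PySem.List.enumerate_eq_map_pyRange (PySem.List.pyGetD graph v []) 0, List.map_map]
  congr 1
  apply List.map_congr_left
  intro i hmem
  have hi : 0 ≤ i := (PySem.List.mem_pyRange_one.mp hmem).1
  simp only [Function.comp_def]
  split_ifs with h
  · rw [pvOuter graph _ _ i hi]
    simp [PySem.Dict.getD, PySem.Dict.get?]
  · rfl

-- ===== VERDICT (by name: the statement is the Claim_ definition above) =====
theorem top_weight_spec : Claim_equal_top_weight := by
  intro graph v _ _
  unfold Spec_top_weight
  rw [pvA_eq_NF, pvB_eq_NF]
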